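-- pv_equiv track=rewrite | github.com/sarev/scale | cuda_activate.py | _split_mixed_path
-- ===== SOURCE A (Python) =====
-- from typing import Iterable, List, Optional, Tuple
--
-- def _split_mixed_path(raw: str) -> List[str]:
--     """
--     Split a mixed PATH string into raw segments.
--
--     This function safely splits a PATH string that may contain both ';' and ':' while preserving Windows drive prefixes like 'D:\\...'.
--     It returns a list of raw segments without trimming or normalisation.
--
--     Parameters:
--     - `raw`: The PATH string to split, possibly containing both ';' and ':'.
--
--     Returns:
--     - A list of raw PATH segments.
--     """
--     if not raw:
--         return []
--     parts: List[str] = []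
--     buf: List[str] = []
--     n = len(raw)
--     for i, ch in enumerate(raw):
--         if ch in (';', ':'):
--             if ch == ':' and i >= 1:
--                 prev = raw[i - 1]
--                 nxt = raw[i + 1] if i + 1 < n else ''
--                 # Detect drive letter pattern "C:\" or "C:/"
--                 if prev.isalpha() and nxt in ('\\', '/'):
--                     buf.append(ch)
--                     continue
--             # split here
--             seg = ''.join(buf).strip()
--             if seg:
--                 parts.append(seg)
--             buf = []
--         else:
--             buf.append(ch)
--     last = ''.join(buf).strip()
--     if last:
--         parts.append(last)
--     return parts
-- ===== SOURCE B (Python) =====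
-- from typing import List
--
-- def _split_mixed_path(raw: str) -> List[str]:
--     """Two-phase split: first record boundary indices, then slice between them."""
--     n = len(raw)
--
--     def is_boundary(i: int) -> bool:
--         ch = raw[i]
--         if ch not in (';', ':'):
--             return False
--         if (ch == ':' and i >= 1 and raw[i - 1].isalpha()
--                 and i + 1 < n and raw[i + 1] in ('\\', '/')):
--             return False  # drive-letter colon like "C:\" — not a separator
--         return True
--
--     bounds = [i for i in range(n) if is_boundary(i)]
--     parts: List[str] = []
--     start = 0
--     for b in bounds + [n]:
--         seg = raw[start:b].strip()
--         if seg: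
--             parts.append(seg)
--         start = b + 1
--     return parts
-- ===== Notes on version B (the rewrite author's own statement) =====
-- stated objective: alternative
-- what changed: Replaces A's single pass with a mutable character buffer by a two-phase algorithm: first compute the list of boundary indices (a separator that is not a drive colon), then build the output by slicing the string between consecutive boundaries and stripping each slice.
import Mathlib
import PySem

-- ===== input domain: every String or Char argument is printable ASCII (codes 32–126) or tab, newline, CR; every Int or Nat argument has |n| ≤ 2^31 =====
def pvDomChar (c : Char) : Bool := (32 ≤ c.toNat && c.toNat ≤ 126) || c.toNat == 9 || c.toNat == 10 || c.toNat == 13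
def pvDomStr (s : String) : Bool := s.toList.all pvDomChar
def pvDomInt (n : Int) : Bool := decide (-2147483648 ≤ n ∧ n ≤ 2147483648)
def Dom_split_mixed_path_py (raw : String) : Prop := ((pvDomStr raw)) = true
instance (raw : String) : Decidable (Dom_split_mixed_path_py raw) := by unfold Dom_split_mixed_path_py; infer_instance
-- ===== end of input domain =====

-- B replaces A's buffer-accumulating single pass by a two-phase algorithm (collect boundary indices, then slice-and-strip between them); alternative structure, same cost.

-- ===== PORT A =====
-- A's loop body over enumerate(raw): state (parts, buf); raw[i-1] / raw[i+1] ported with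
-- pyGetD (exact: each is only read when its guard puts the index in range, so Python never raises)
def pvAStep (cs : List Char) (n : Int) (st : List String × List Char) (p : Int × Char) : List String × List Char :=
  let i := p.1
  let ch := p.2
  if ch == ';' || ch == ':' then
    if ch == ':' && decide (1 ≤ i) &&
       PySem.Chars.isalpha (PySem.List.pyGetD cs (i - 1) ' ') &&
       (if i + 1 < n then
          (let nxt := PySem.List.pyGetD cs (i + 1) ' '
           nxt == '\\' || nxt == '/')
        else false) then
      (st.1, st.2 ++ [ch])          -- drive-letter colon: keep it in buf ("continue")
    else
      let seg := PySem.Chars.strip st.2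
      ((if seg ≠ [] then st.1 ++ [String.ofList seg] else st.1), [])      -- split here
  else
    (st.1, st.2 ++ [ch])

def split_mixed_path_py (raw : String) : List String :=
  let cs := raw.toList
  if cs = [] then []                -- if not raw: return []
  else
    let n : Int := cs.length
    let st := (PySem.List.enumerate cs 0).foldl (pvAStep cs n) ([], [])
    let last := PySem.Chars.strip st.2
    if last ≠ [] then st.1 ++ [String.ofList last] else st.1

-- ===== PORT B =====
-- is_boundary(i): raw[i] is a separator that is not a drive-letter colon
def pvIsBoundary (cs : List Char) (i : Nat) : Bool :=
  let ch := cs.getD i ' '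
  if !(ch == ';' || ch == ':') then false
  else if ch == ':' && decide (1 ≤ i) && PySem.Chars.isalpha (cs.getD (i - 1) ' ') &&
          decide (i + 1 < cs.length) &&
          (let nxt := cs.getD (i + 1) ' '
           nxt == '\\' || nxt == '/') then false
  else true

-- fold body of B's second phase: state (parts, start); seg = raw[start:b].strip()
def pvBStep (cs : List Char) (st : List String × Nat) (b : Nat) : List String × Nat :=
  let seg := PySem.Chars.strip (PySem.List.slice cs (some (st.2 : Int)) (some (b : Int)))
  ((if seg ≠ [] then st.1 ++ [String.ofList seg] else st.1), b + 1)

def split_mixed_path_py_alt (raw : String) : List String :=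
  let cs := raw.toList
  -- range(n) over Nat indices (exact: the indices are 0 ≤ i < n)
  let bounds := (List.range cs.length).filter (pvIsBoundary cs)
  ((bounds ++ [cs.length]).foldl (pvBStep cs) ([], 0)).1

-- ===== PRECONDITION & SPEC =====
def Spec_split_mixed_path_py (raw : String) (out : List String) : Prop := out = split_mixed_path_py_alt raw
instance (raw : String) (out : List String) : Decidable (Spec_split_mixed_path_py raw out) := by unfold Spec_split_mixed_path_py; infer_instance

-- ===== CLAIM (what is proved, stated in full; the proofs are below) =====
def Claim_equal_split_mixed_path_py : Prop := ∀ (raw : String), Dom_split_mixed_path_py raw → Spec_split_mixed_path_py raw (split_mixed_path_py raw)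

-- ===== LEMMAS AND PROOFS =====

-- A's final flush of the buffer, as a function of the loop state
def pvAFin (st : List String × List Char) : List String :=
  let last := PySem.Chars.strip st.2
  if last ≠ [] then st.1 ++ [String.ofList last] else st.1

-- A's step at position k is "flush" iff pvIsBoundary holds there, else "append cs[k] to buf"
set_option maxRecDepth 4096 in
theorem pvAStep_char (cs : List Char) (k : Nat) (hk : k < cs.length) (st : List String × List Char) :
    pvAStep cs (cs.length : Int) st ((k : Int), cs[k]) =
      if pvIsBoundary cs k = true then
        ((if PySem.Chars.strip st.2 ≠ [] then st.1 ++ [String.ofList (PySem.Chars.strip st.2)] else st.1), [])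
      else (st.1, st.2 ++ [cs[k]]) := by
  have hgk : cs.getD k ' ' = cs[k] := by simp [List.getD_eq_getElem?_getD, List.getElem?_eq_getElem hk]
  by_cases h3 : 1 ≤ k
  · have e1 : (k:Int) - 1 = ((k-1:Nat):Int) := by omega
    have e2 : (k:Int) + 1 = ((k+1:Nat):Int) := by omega
    by_cases h4 : k + 1 < cs.length <;>
      simp only [pvAStep, pvIsBoundary, e1, e2, PySem.List.pyGetD_natCast, Nat.cast_lt,
        Nat.one_le_cast, hgk, h3, h4, decide_true, decide_false, if_false,
        Bool.and_true, Bool.and_false, if_pos] <;>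
      split_ifs <;> simp_all
  · have h3' : ¬ (1 ≤ (k:Int)) := by omega
    simp only [pvAStep, pvIsBoundary, hgk, h3, h3', decide_false, Bool.and_false, Bool.false_and,
      if_false]
    split_ifs <;> simp_all

-- appending cs[k] to the buffer raw[s:k] gives raw[s:k+1]
theorem pvTakeSnoc (cs : List Char) (s k : Nat) (hs : s ≤ k) (hk : k < cs.length) :
    (cs.drop s).take (k - s) ++ [cs[k]] = (cs.drop s).take (k + 1 - s) := by
  have h1 : k + 1 - s = (k - s) + 1 := by omega
  rw [h1, List.take_add_one]
  have h2 : (cs.drop s)[k - s]? = some cs[k] := by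
    rw [List.getElem?_drop]
    have hx : s + (k - s) = k := by omega
    rw [hx, List.getElem?_eq_getElem hk]
  simp [h2]

-- invariant: A's loop from position k with buf = raw[s:k] (s = one past the last boundary),
-- followed by the final flush, equals B's fold over the boundaries ≥ k plus the sentinel n
theorem pvMain (cs : List Char) :
    ∀ (m k s : Nat) (parts : List String), cs.length - k = m → s ≤ k → k ≤ cs.length →
    pvAFin ((PySem.List.enumerate (cs.drop k) (k : Int)).foldl (pvAStep cs (cs.length : Int))
              (parts, (cs.drop s).take (k - s))) =
    ((((List.range' k (cs.length - k)).filter (pvIsBoundary cs)) ++ [cs.length]).foldl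
        (pvBStep cs) (parts, s)).1 := by
  intro m
  induction m with
  | zero =>
    intro k s parts hm hs hk
    have hke : k = cs.length := by omega
    subst hke
    simp only [List.drop_length, PySem.List.enumerate_nil, List.foldl_nil, Nat.sub_self,
      List.range'_zero, List.filter_nil, List.nil_append, List.foldl_cons]
    simp [pvAFin, pvBStep, PySem.List.slice_natCast]
  | succ m ih =>
    intro k s parts hm hs hk
    have hklt : k < cs.length := by omega
    have hdrop : cs.drop k = cs[k] :: cs.drop (k + 1) := List.drop_eq_getElem_cons hklt
    have hrange : List.range' k (cs.length - k) = k :: List.range' (k + 1) (cs.length - (k + 1)) := by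
      have : cs.length - k = (cs.length - (k + 1)) + 1 := by omega
      rw [this, List.range'_succ]
    rw [hdrop, PySem.List.enumerate_cons, List.foldl_cons, hrange]
    have hcast : (k : Int) + 1 = ((k + 1 : Nat) : Int) := by push_cast; ring
    rw [hcast, pvAStep_char cs k hklt]
    by_cases hb : pvIsBoundary cs k = true
    · rw [if_pos hb]
      have hfil : (k :: List.range' (k + 1) (cs.length - (k + 1))).filter (pvIsBoundary cs)
          = k :: (List.range' (k + 1) (cs.length - (k + 1))).filter (pvIsBoundary cs) := by
        simp [List.filter_cons, hb]
      rw [hfil, List.cons_append, List.foldl_cons]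
      have hstep : pvBStep cs (parts, s) k =
          ((if PySem.Chars.strip ((cs.drop s).take (k - s)) ≠ [] then
              parts ++ [String.ofList (PySem.Chars.strip ((cs.drop s).take (k - s)))] else parts), k + 1) := by
        simp [pvBStep, PySem.List.slice_natCast]
      rw [hstep]
      have := ih (k + 1) (k + 1)
        (if PySem.Chars.strip ((cs.drop s).take (k - s)) ≠ [] then
            parts ++ [String.ofList (PySem.Chars.strip ((cs.drop s).take (k - s)))] else parts)
        (by omega) (by omega) (by omega)
      simpa using this
    · rw [if_neg hb]
      have hfil : (k :: List.range' (k + 1) (cs.length - (k + 1))).filter (pvIsBoundary cs)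
          = (List.range' (k + 1) (cs.length - (k + 1))).filter (pvIsBoundary cs) := by
        simp [List.filter_cons, hb]
      rw [hfil]
      have := ih (k + 1) s parts (by omega) (by omega) (by omega)
      rw [pvTakeSnoc cs s k hs hklt]
      simpa using this

-- ===== VERDICT (by name: the statement is the Claim_ definition above) =====
theorem split_mixed_path_py_spec : Claim_equal_split_mixed_path_py := by
  intro raw _
  show split_mixed_path_py raw = split_mixed_path_py_alt raw
  unfold split_mixed_path_py split_mixed_path_py_alt
  by_cases h : raw.toList = []
  · simp only [h, if_pos]
    simp [pvBStep, PySem.List.slice, PySem.Chars.strip, PySem.Chars.lstrip, PySem.Chars.rstrip]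
  · rw [if_neg h]
    simp only [List.range_eq_range']
    have := pvMain raw.toList raw.toList.length 0 0 [] (by omega) (by omega) (by omega)
    simp only [List.drop_zero, Nat.sub_zero, List.take_zero, Nat.cast_zero] at this
    simpa [pvAFin] using this
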